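-- pv_equiv track=rewrite | github.com/claudiofin/autoresearch-funzionale | src/state_machine/injection.py | _is_recursive_path
-- ===== SOURCE A (Python) =====
-- def _is_recursive_path(path: str) -> bool:
--     """Check if a state path shows recursive/fractal patterns.
--
--     ANTI-FRATTALE (Strict Path Unique Guard): Detects patterns like:
--     - 'navigation.app_initial.app_initial.ready' (immediate repetition)
--     - 'workflows.idle.price_alert_workflow.idle.price_alert_workflow' (alternating loops)
--     - 'none.error.error_handler.none.error.error_handler' (semantic recursion)
--
--     KEY INSIGHT: If a state name appears ANYWHERE in the ancestor chain,
--     it's a recursive pattern — even if not consecutive.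
--
--     Args:
--         path: Full state path (e.g., 'navigation.app_initial.app_initial.ready')
--
--     Returns:
--         True if the path contains recursive patterns
--     """
--     parts = path.split(".")
--     if len(parts) < 2:
--         return False
--
--     # Skip the first part (branch name like 'navigation' or 'workflows')
--     state_parts = parts[1:] if len(parts) > 1 else parts
--
--     # Check for ANY duplicate in the state chain (not just consecutive)
--     seen = set()
--     for part in state_parts:
--         if part in seen:
--             return True  # Found a duplicate anywhere in the chain
--         seen.add(part)
--
--     # Check for alternating pattern (A-B-A-B) in last 4 segments
--     if len(state_parts) >= 4:
--         last_4 = state_parts[-4:]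
--         if last_4[0] == last_4[2] and last_4[1] == last_4[3]:
--             return True
--
--     # Check for 3-segment repetition (A-B-C-A) indicating a loop
--     if len(state_parts) >= 4:
--         last_4 = state_parts[-4:]
--         if last_4[0] == last_4[3]:
--             return True
--
--     return False
-- ===== SOURCE B (Python) =====
-- def _is_recursive_path(path: str) -> bool:
--     parts = path.split(".")
--     if len(parts) < 2:
--         return False
--     # sort the state segments: any duplicate becomes an adjacent equal pair
--     s = sorted(parts[1:])
--     return any(a == b for a, b in zip(s, s[1:]))
-- ===== Notes on version B (the rewrite author's own statement) =====
-- stated objective: alternative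
-- what changed: Replaces the incremental seen-set loop with early return (plus the dead alternating/A-B-C-A last-4 checks, which can never fire once no duplicate exists) by sorting the state segments and scanning once for an adjacent equal pair.
import Mathlib
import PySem

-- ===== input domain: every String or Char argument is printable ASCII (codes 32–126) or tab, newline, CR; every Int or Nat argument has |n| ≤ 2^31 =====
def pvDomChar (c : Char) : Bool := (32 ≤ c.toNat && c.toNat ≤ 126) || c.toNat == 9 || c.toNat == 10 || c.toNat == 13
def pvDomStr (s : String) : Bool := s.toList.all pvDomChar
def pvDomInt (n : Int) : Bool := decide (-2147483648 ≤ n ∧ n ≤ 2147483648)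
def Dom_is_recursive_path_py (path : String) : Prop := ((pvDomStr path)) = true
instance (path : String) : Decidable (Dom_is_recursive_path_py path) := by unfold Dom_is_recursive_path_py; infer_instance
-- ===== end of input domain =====

-- B detects a duplicate state segment by sort-then-adjacent-scan instead of A's seen-set loop
-- with early return plus A's dead last-4 checks (alternative decomposition, same result).

-- ===== PORT A =====
-- the 'for part in state_parts: if part in seen: return True; seen.add(part)' loop
def pvDupLoop (seen : PySem.Set String) : List String → Bool
  | [] => false
  | p :: rest =>
      if PySem.Set.contains seen p then true
      else pvDupLoop (PySem.Set.add seen p) rest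

def is_recursive_path_py (path : String) : Bool :=
  let parts := (PySem.Chars.splitOn path.toList ['.']).map String.ofList
  if parts.length < 2 then false
  else
    let state_parts := if parts.length > 1 then PySem.List.slice parts (some 1) none else parts
    if pvDupLoop PySem.Set.empty state_parts then true
    else if (if 4 ≤ state_parts.length then
               let last4 := PySem.List.slice state_parts (some (-4)) none
               (PySem.List.pyGetD last4 0 "" == PySem.List.pyGetD last4 2 "")
                 && (PySem.List.pyGetD last4 1 "" == PySem.List.pyGetD last4 3 "")
             else false) then true
    else if (if 4 ≤ state_parts.length then
               let last4 := PySem.List.slice state_parts (some (-4)) none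
               (PySem.List.pyGetD last4 0 "" == PySem.List.pyGetD last4 3 "")
             else false) then true
    else false

-- ===== PORT B =====
def is_recursive_path_py_alt (path : String) : Bool :=
  let parts := (PySem.Chars.splitOn path.toList ['.']).map String.ofList
  if parts.length < 2 then false
  else
    let s := PySem.List.sorted (PySem.List.slice parts (some 1) none) (fun x => x) false
    (s.zip (PySem.List.slice s (some 1) none)).any (fun p => p.1 == p.2)

-- ===== PRECONDITION & SPEC =====
def Spec_is_recursive_path_py (path : String) (out : Bool) : Prop := out = is_recursive_path_py_alt path
instance (path : String) (out : Bool) : Decidable (Spec_is_recursive_path_py path out) := by unfold Spec_is_recursive_path_py; infer_instance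

-- ===== CLAIM (what is proved, stated in full; the proofs are below) =====
def Claim_equal_is_recursive_path_py : Prop := ∀ (path : String), Dom_is_recursive_path_py path → Spec_is_recursive_path_py path (is_recursive_path_py path)

-- ===== LEMMAS AND PROOFS =====

-- A's seen-set loop returns false iff the remaining segments are duplicate-free and disjoint from seen
theorem pvDupLoop_false_iff (ps : List String) :
    ∀ seen : PySem.Set String,
      pvDupLoop seen ps = false ↔ (ps.Nodup ∧ ∀ p ∈ ps, p ∉ seen) := by
  induction ps with
  | nil => intro seen; simp [pvDupLoop]
  | cons p rest ih =>
      intro seen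
      simp only [pvDupLoop]
      by_cases hp : p ∈ seen
      · rw [if_pos ((PySem.Set.contains_iff seen p).2 hp)]
        simp only [Bool.true_eq_false, false_iff]
        rintro ⟨_, h⟩
        exact h p (List.mem_cons_self ..) hp
      · rw [if_neg (fun hc => hp ((PySem.Set.contains_iff seen p).1 hc)), ih]
        constructor
        · rintro ⟨hnd, hdisj⟩
          refine ⟨List.nodup_cons.2 ⟨fun hmem => ?_, hnd⟩, fun q hq => ?_⟩
          · exact (hdisj p hmem) ((PySem.Set.mem_add seen p p).2 (Or.inr rfl))
          · rcases List.mem_cons.1 hq with rfl | hq'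
            · exact hp
            · exact fun hs => (hdisj q hq') ((PySem.Set.mem_add seen p q).2 (Or.inl hs))
        · rintro ⟨hndc, hall⟩
          obtain ⟨hpn, hnd⟩ := List.nodup_cons.1 hndc
          refine ⟨hnd, fun q hq hqadd => ?_⟩
          rcases (PySem.Set.mem_add seen p q).1 hqadd with hs | rfl
          · exact hall q (List.mem_cons_of_mem p hq) hs
          · exact hpn hq

-- a duplicate-free list has no adjacent equal pair
theorem adj_false_of_nodup (s : List String) (h : s.Nodup) :
    (s.zip s.tail).any (fun p => p.1 == p.2) = false := by
  induction s with
  | nil => rfl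
  | cons a rest ih =>
      cases rest with
      | nil => rfl
      | cons b t =>
          simp only [List.tail_cons, List.zip_cons_cons, List.any_cons, Bool.or_eq_false_iff]
          have hab : a ≠ b := by
            intro hab; exact (List.nodup_cons.1 h).1 (hab ▸ List.mem_cons_self ..)
          refine ⟨by simpa using hab, ?_⟩
          simpa using ih (List.nodup_cons.1 h).2

-- a ≤-sorted list with no adjacent equal pair is duplicate-free
theorem nodup_of_adj_false (s : List String)
    (hs : s.Pairwise (fun a b => a ≤ b))
    (h : (s.zip s.tail).any (fun p => p.1 == p.2) = false) : s.Nodup := by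
  induction s with
  | nil => exact List.nodup_nil
  | cons a rest ih =>
      cases rest with
      | nil => simp
      | cons b t =>
          simp only [List.tail_cons, List.zip_cons_cons, List.any_cons,
            Bool.or_eq_false_iff] at h
          obtain ⟨hab', hrest⟩ := h
          have hab : a ≠ b := by simpa using hab'
          have hpair := List.pairwise_cons.1 hs
          have hnd : (b :: t).Nodup := ih hpair.2 (by simpa using hrest)
          refine List.nodup_cons.2 ⟨?_, hnd⟩
          intro hmem
          have haltb : a < b := lt_of_le_of_ne (hpair.1 b (List.mem_cons_self ..)) hab
          rcases List.mem_cons.1 hmem with rfl | hmt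
          · exact hab rfl
          · have hble : b ≤ a := (List.pairwise_cons.1 hpair.2).1 a hmt
            exact absurd (lt_of_lt_of_le haltb hble) (lt_irrefl a)

-- B's adjacent scan over sorted l finds a pair iff l has a duplicate
theorem adj_sorted_iff (l : List String) :
    (((PySem.List.sorted l (fun x => x) false).zip
        ((PySem.List.sorted l (fun x => x) false).tail)).any (fun p => p.1 == p.2) = false)
      ↔ l.Nodup := by
  have hperm : (PySem.List.sorted l (fun x => x) false).Perm l :=
    PySem.List.sorted_perm l (fun x => x) false
  constructor
  · intro h
    exact hperm.nodup_iff.1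
      (nodup_of_adj_false _ (PySem.List.sorted_pairwise l (fun x => x)) h)
  · intro h
    exact adj_false_of_nodup _ (hperm.nodup_iff.2 h)

-- a Nodup 4-element list has distinct entries at distinct indices (the dead last-4 tests)
theorem pyGetD_beq_false_of_nodup4 (l : List String) (hnd : l.Nodup) (hl : l.length = 4)
    (i j : ℤ) (hi0 : 0 ≤ i) (hi : i < 4) (hj0 : 0 ≤ j) (hj : j < 4) (hij : i ≠ j) :
    (PySem.List.pyGetD l i "" == PySem.List.pyGetD l j "") = false := by
  rw [PySem.List.pyGetD_eq_getElem l "" hi0 (by omega),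
      PySem.List.pyGetD_eq_getElem l "" hj0 (by omega)]
  refine beq_eq_false_iff_ne.2 fun h => ?_
  have := hnd.getElem_inj_iff.1 h
  omega

-- ===== VERDICT (by name: the statement is the Claim_ definition above) =====
theorem is_recursive_path_py_spec : Claim_equal_is_recursive_path_py := by
  intro path _
  unfold Spec_is_recursive_path_py is_recursive_path_py is_recursive_path_py_alt
  set parts := (PySem.Chars.splitOn path.toList ['.']).map String.ofList with hparts
  by_cases hlen : parts.length < 2
  · simp [hlen]
  · simp only [hlen, if_false]
    have hgt : parts.length > 1 := by omega
    simp only [hgt, if_true]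
    set sp := PySem.List.slice parts (some 1) none with hsp
    set s := PySem.List.sorted sp (fun x => x) false with hs
    rw [PySem.List.slice_from_one]
    by_cases hnd : sp.Nodup
    · -- no duplicate: A's loop is false and the dead last-4 checks cannot fire
      have hloop : pvDupLoop PySem.Set.empty sp = false :=
        (pvDupLoop_false_iff sp PySem.Set.empty).2 ⟨hnd, by intro p _ hp; cases hp⟩
      have hadj : (s.zip s.tail).any (fun p => p.1 == p.2) = false :=
        (adj_sorted_iff sp).2 hnd
      rw [hloop, hadj]
      by_cases h4 : 4 ≤ sp.length
      · rw [PySem.List.slice_from_neg_ofNat sp 4 (by omega)]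
        have hl4len : (sp.drop (sp.length - 4)).length = 4 := by
          rw [List.length_drop]; omega
        have hl4nd : (sp.drop (sp.length - 4)).Nodup := hnd.sublist (List.drop_sublist _ _)
        rw [pyGetD_beq_false_of_nodup4 _ hl4nd hl4len 0 2 (by omega) (by omega)
              (by omega) (by omega) (by omega),
            pyGetD_beq_false_of_nodup4 _ hl4nd hl4len 0 3 (by omega) (by omega)
              (by omega) (by omega) (by omega)]
        simp [h4]
      · simp [h4]
    · -- a duplicate exists: A's loop returns true, and B's adjacent scan finds a pair
      have hloop : pvDupLoop PySem.Set.empty sp = true := by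
        cases h : pvDupLoop PySem.Set.empty sp
        · exact absurd ((pvDupLoop_false_iff sp PySem.Set.empty).1 h).1 hnd
        · rfl
      have hadj : (s.zip s.tail).any (fun p => p.1 == p.2) = true := by
        cases h : (s.zip s.tail).any (fun p => p.1 == p.2)
        · exact absurd ((adj_sorted_iff sp).1 (by rw [hs] at h; exact h)) hnd
        · rfl
      rw [hloop, hadj]
      simp
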